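-- pv_equiv track=rewrite | github.com/taufit23/CorsTester | cors-advanced.py | ekstrak_header_cors
-- ===== SOURCE A (Python) =====
-- from typing import Dict, Tuple
--
-- def ekstrak_header_cors(header: Dict) -> Dict:
--     header_cors = {}
--     kunci_cors = [
--         'access-control-allow-origin',
--         'access-control-allow-credentials',
--         'access-control-allow-methods',
--         'access-control-allow-headers',
--         'access-control-max-age',
--         'access-control-expose-headers',
--         'access-control-request-method',
--         'access-control-request-headers',
--     ]
--
--     for kunci in kunci_cors:
--         if kunci in header:
--             header_cors[kunci] = header[kunci]
--
--     return header_cors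
-- ===== SOURCE B (Python) =====
-- _KUNCI_CORS = (
--     'access-control-allow-origin',
--     'access-control-allow-credentials',
--     'access-control-allow-methods',
--     'access-control-allow-headers',
--     'access-control-max-age',
--     'access-control-expose-headers',
--     'access-control-request-method',
--     'access-control-request-headers',
-- )
-- _CORS_SET = frozenset(_KUNCI_CORS)
--
--
-- def ekstrak_header_cors(header):
--     # one pass over the header items, keeping entries whose key is a known
--     # CORS key, then emit in the canonical key order
--     ada = {k: v for k, v in header.items() if k in _CORS_SET}
--     return {k: ada[k] for k in _KUNCI_CORS if k in ada}
-- ===== Notes on version B (the rewrite author's own statement) =====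
-- stated objective: alternative
-- what changed: B scans the header items once, filtering them through a frozenset of the eight CORS keys, and then emits the found entries in canonical key order, instead of A's probing of the dict for each candidate key.
import Mathlib
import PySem

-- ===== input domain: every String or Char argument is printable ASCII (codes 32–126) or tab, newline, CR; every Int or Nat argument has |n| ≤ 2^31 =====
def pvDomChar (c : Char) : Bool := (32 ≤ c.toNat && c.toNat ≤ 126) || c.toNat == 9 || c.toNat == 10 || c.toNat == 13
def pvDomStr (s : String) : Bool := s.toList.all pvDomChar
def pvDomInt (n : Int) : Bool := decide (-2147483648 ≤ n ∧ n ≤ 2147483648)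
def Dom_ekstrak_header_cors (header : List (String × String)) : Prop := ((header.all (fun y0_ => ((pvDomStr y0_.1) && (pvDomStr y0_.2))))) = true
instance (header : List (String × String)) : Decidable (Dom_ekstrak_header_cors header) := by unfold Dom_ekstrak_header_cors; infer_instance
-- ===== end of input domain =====

-- B replaces A's probe-the-dict-per-candidate-key loop by one filtering scan of the
-- header through a set of the CORS keys, emitted in canonical key order (alternative).


-- ===== PORT A =====
def kunciCorsA : List String :=
  [ "access-control-allow-origin",
    "access-control-allow-credentials",
    "access-control-allow-methods",
    "access-control-allow-headers",
    "access-control-max-age",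
    "access-control-expose-headers",
    "access-control-request-method",
    "access-control-request-headers" ]

def ekstrak_header_cors (header : List (String × String)) : List (String × String) :=
  (kunciCorsA.foldl
    (fun d k =>
      match PySem.Dict.get? (PySem.Dict.mk header) k with
      | some v => d.insert k v
      | none => d)
    PySem.Dict.empty).items

-- ===== PORT B =====
def kunciCorsB : List String :=
  [ "access-control-allow-origin",
    "access-control-allow-credentials",
    "access-control-allow-methods",
    "access-control-allow-headers",
    "access-control-max-age",
    "access-control-expose-headers",
    "access-control-request-method",
    "access-control-request-headers" ]

def corsSet : PySem.Set String := PySem.Set.ofList kunciCorsB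

def ekstrak_header_cors_alt (header : List (String × String)) : List (String × String) :=
  let ada := header.foldl
    (fun d p => if PySem.Set.contains corsSet p.1 then d.insert p.1 p.2 else d)
    PySem.Dict.empty
  kunciCorsB.filterMap (fun k => (PySem.Dict.get? ada k).map (fun v => (k, v)))

-- ===== PRECONDITION & SPEC =====
-- Pre_ excludes association lists with duplicate keys; a Python dict argument can never
-- have them, and on such lists A's first-match lookup and B's last-wins filter disagree.
def Pre_ekstrak_header_cors (header : List (String × String)) : Prop :=
  (header.map Prod.fst).Nodup
instance (header : List (String × String)) : Decidable (Pre_ekstrak_header_cors header) := by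
  unfold Pre_ekstrak_header_cors; infer_instance

def pvWitness_ekstrak_header_cors : (List (String × String)) :=
  [("access-control-allow-origin", "*"), ("content-type", "text/html")]

def Spec_ekstrak_header_cors (header : List (String × String)) (out : List (String × String)) : Prop := out = ekstrak_header_cors_alt header
instance (header : List (String × String)) (out : List (String × String)) : Decidable (Spec_ekstrak_header_cors header out) := by unfold Spec_ekstrak_header_cors; infer_instance

-- ===== CLAIM (what is proved, stated in full; the proofs are below) =====
def Claim_equal_ekstrak_header_cors : Prop := ∀ (header : List (String × String)), Dom_ekstrak_header_cors header → Pre_ekstrak_header_cors header → Spec_ekstrak_header_cors header (ekstrak_header_cors header)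

-- ===== LEMMAS AND PROOFS =====

-- A's loop over distinct fresh candidate keys appends exactly the hits, in key order.
theorem foldl_probe_items (g : String → Option String) :
    ∀ (ks : List String) (d : PySem.Dict String String), ks.Nodup →
      (∀ k ∈ ks, d.contains k = false) →
      (ks.foldl
        (fun d k => match g k with
          | some v => d.insert k v
          | none => d) d).items
        = d.items ++ ks.filterMap (fun k => (g k).map (fun v => (k, v))) := by
  intro ks
  induction ks with
  | nil => intro d _ _; simp
  | cons k t ih =>
    intro d hnd hfresh
    simp only [List.foldl_cons, List.filterMap_cons]
    cases hg : g k with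
    | none =>
      simp only [Option.map_none]
      exact ih d (List.Nodup.of_cons hnd) (fun j hj => hfresh j (List.mem_cons_of_mem _ hj))
    | some v =>
      simp only [Option.map_some]
      rw [ih (d.insert k v) (List.Nodup.of_cons hnd)
        (fun j hj => by
          rw [PySem.Dict.contains_insert]
          have hjk : j ≠ k := fun h => (List.nodup_cons.mp hnd).1 (h ▸ hj)
          simp [hjk, hfresh j (List.mem_cons_of_mem _ hj)])]
      rw [PySem.Dict.items_insert_of_not_contains d v (hfresh k (List.mem_cons_self))]
      simp

-- first-match lookup commutes with filtering by a key predicate the key satisfies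
theorem get?_mk_filter (q : String → Bool) :
    ∀ (hs : List (String × String)) (k : String), q k = true →
      PySem.Dict.get? (PySem.Dict.mk (hs.filter (fun p => q p.1))) k
        = PySem.Dict.get? (PySem.Dict.mk hs) k := by
  intro hs
  induction hs with
  | nil => intro k _; rfl
  | cons p t ih =>
    obtain ⟨a, b⟩ := p
    intro k hk
    by_cases hak : a = k
    · rw [List.filter_cons_of_pos (by simpa [hak] using hk)]
      simp [PySem.Dict.get?_mk_cons, hak]
    · rcases hq : q a with _ | _
      · rw [List.filter_cons_of_neg (by simp [hq]), ih k hk,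
          PySem.Dict.get?_mk_cons]
        simp [hak]
      · rw [List.filter_cons_of_pos (by simp [hq])]
        rw [PySem.Dict.get?_mk_cons, PySem.Dict.get?_mk_cons]
        have hbeq : (a == k) = false := by simp [hak]
        rw [hbeq]
        simp [ih k hk]

-- B's filtering pass over a duplicate-free header is the filtered header as a dict
theorem ada_eq_mk_filter (header : List (String × String))
    (hnd : (header.map Prod.fst).Nodup) :
    header.foldl
      (fun d p => if PySem.Set.contains corsSet p.1 then d.insert p.1 p.2 else d)
      PySem.Dict.empty
      = PySem.Dict.mk (header.filter (fun p => PySem.Set.contains corsSet p.1)) := by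
  rw [PySem.List.foldl_if_eq_foldl_filter]
  apply PySem.Dict.ext
  rw [PySem.Dict.items_foldl_insert_fresh
      (header.filter (fun p => PySem.Set.contains corsSet p.1)) Prod.fst Prod.snd
      PySem.Dict.empty
      (fun a _ => PySem.Dict.contains_empty a.1)
      (by
        · have hsub : (header.filter (fun p => PySem.Set.contains corsSet p.1)).map Prod.fst
            |>.Sublist (header.map Prod.fst) :=
          List.Sublist.map _ List.filter_sublist
          exact hsub.nodup hnd)]
  simp [PySem.Dict.empty]

-- ===== VERDICT (by name: the statement is the Claim_ definition above) =====
theorem ekstrak_header_cors_spec : Claim_equal_ekstrak_header_cors := by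
  intro header _ hpre
  unfold Spec_ekstrak_header_cors ekstrak_header_cors ekstrak_header_cors_alt
  rw [foldl_probe_items (fun k => PySem.Dict.get? (PySem.Dict.mk header) k) kunciCorsA
      PySem.Dict.empty (by decide) (fun k _ => PySem.Dict.contains_empty k)]
  rw [ada_eq_mk_filter header hpre]
  simp only [PySem.Dict.empty, List.nil_append]
  have hAB : kunciCorsA = kunciCorsB := rfl
  rw [hAB]
  apply List.filterMap_congr
  intro k hk
  rw [get?_mk_filter (fun s => PySem.Set.contains corsSet s) header k
      (by fin_cases hk <;> decide)]
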